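-- pv_equiv track=rewrite | github.com/sachinkum0009/eslab_rtos | rover/drawScenario.py | define_mode
-- ===== SOURCE A (Python) =====
-- def define_mode (targets_scenario,game_mode):
--
-- 	if game_mode =="mixed":
--
-- 		if len(targets_scenario)>1:
-- 			for i in range (len(targets_scenario)-1, 1,-1):
-- 				x_list=targets_scenario[1]
-- 				targets_scenario[1]=targets_scenario[i]
-- 				targets_scenario[i]=x_list
--
-- 		return targets_scenario
-- 	elif game_mode =="top":
-- 		return targets_scenario[::-1]
-- 	else:
-- 		return targets_scenario
-- ===== SOURCE B (Python) =====
-- def define_mode(targets_scenario, game_mode):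
--     # B: replace the O(n) swap loop by a single slice assignment that left-rotates
--     # the tail (indices >= 1) by one; same in-place mutation, same return value.
--     if game_mode == "mixed":
--         if len(targets_scenario) > 1:
--             targets_scenario[1:] = targets_scenario[2:] + targets_scenario[1:2]
--         return targets_scenario
--     elif game_mode == "top":
--         return targets_scenario[::-1]
--     else:
--         return targets_scenario
-- ===== Notes on version B (the rewrite author's own statement) =====
-- stated objective: simpler
-- what changed: The 'mixed' branch's repeated pairwise swap loop is replaced by a single slice assignment targets_scenario[1:] = targets_scenario[2:] + targets_scenario[1:2], which performs the same left-rotation of the tail in one step; the other branches are unchanged.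
import Mathlib
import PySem

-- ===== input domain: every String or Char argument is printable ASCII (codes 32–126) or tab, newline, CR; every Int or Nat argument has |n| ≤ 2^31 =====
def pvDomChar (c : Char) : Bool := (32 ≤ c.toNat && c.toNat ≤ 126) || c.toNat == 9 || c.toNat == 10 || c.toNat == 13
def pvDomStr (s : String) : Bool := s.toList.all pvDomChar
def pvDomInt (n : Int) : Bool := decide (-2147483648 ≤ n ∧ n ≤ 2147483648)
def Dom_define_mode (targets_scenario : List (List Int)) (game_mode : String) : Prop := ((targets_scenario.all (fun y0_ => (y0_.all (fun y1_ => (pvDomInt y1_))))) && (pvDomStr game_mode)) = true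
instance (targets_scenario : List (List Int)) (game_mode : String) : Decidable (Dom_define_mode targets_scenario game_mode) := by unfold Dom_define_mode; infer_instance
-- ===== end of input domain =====

-- B replaces A's swap loop by one slice concatenation (left-rotate the tail by one);
-- both Pythons mutate the list in place in the 'mixed' branch — the mutation is the
-- same in A and B, and the equivalence proved here is about the RETURN value.

-- ===== PORT A =====
-- the loop body: x_list = s[1]; s[1] = s[i]; s[i] = x_list
-- pyGetD/pySetD are exact here: the loop only visits indices 2 ≤ i ≤ len-1, in range.
def pvSwapStep (s : List (List Int)) (i : Int) : List (List Int) :=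
  let x_list := PySem.List.pyGetD s 1 []
  let s1 := PySem.List.pySetD s 1 (PySem.List.pyGetD s i [])
  PySem.List.pySetD s1 i x_list

def define_mode (targets_scenario : List (List Int)) (game_mode : String) : List (List Int) :=
  if game_mode == "mixed" then
    if (targets_scenario.length : Int) > 1 then
      (PySem.List.pyRange ((targets_scenario.length : Int) - 1) 1 (-1)).foldl
        pvSwapStep targets_scenario
    else targets_scenario
  else if game_mode == "top" then
    (PySem.List.slice? targets_scenario none none (-1)).getD []
  else
    targets_scenario

-- ===== PORT B =====
-- return value of Source B: after l[1:] = l[2:] + l[1:2], the list is l[:1] + (l[2:] + l[1:2])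
def define_mode_alt (targets_scenario : List (List Int)) (game_mode : String) : List (List Int) :=
  if game_mode == "mixed" then
    if (targets_scenario.length : Int) > 1 then
      PySem.List.slice targets_scenario none (some 1) ++
        (PySem.List.slice targets_scenario (some 2) none ++
         PySem.List.slice targets_scenario (some 1) (some 2))
    else targets_scenario
  else if game_mode == "top" then
    (PySem.List.slice? targets_scenario none none (-1)).getD []
  else
    targets_scenario

-- ===== PRECONDITION & SPEC =====
def Spec_define_mode (targets_scenario : List (List Int)) (game_mode : String) (out : List (List Int)) : Prop := out = define_mode_alt targets_scenario game_mode
instance (targets_scenario : List (List Int)) (game_mode : String) (out : List (List Int)) : Decidable (Spec_define_mode targets_scenario game_mode out) := by unfold Spec_define_mode; infer_instance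

-- ===== CLAIM (what is proved, stated in full; the proofs are below) =====
def Claim_equal_define_mode : Prop := ∀ (targets_scenario : List (List Int)) (game_mode : String), Dom_define_mode targets_scenario game_mode → Spec_define_mode targets_scenario game_mode (define_mode targets_scenario game_mode)

-- ===== LEMMAS AND PROOFS =====

-- one swap of A's loop, on the decomposed state: positions are a=0, x=1, u'=2..|u'|+1,
-- z at |u'|+2 = i, w after; swapping 1 and i exchanges x and z.
theorem pvSwapStep_eq (a x z : List Int) (u' w : List (List Int)) :
    pvSwapStep (a :: x :: (u' ++ z :: w)) ((u'.length : Int) + 2)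
      = a :: z :: (u' ++ x :: w) := by
  have h2 : ((u'.length : Int) + 2) = ((u'.length + 2 : Nat) : Int) := by push_cast; ring
  have hg : PySem.List.pyGetD (a :: x :: (u' ++ z :: w)) ((u'.length : Int) + 2) ([] : List Int) = z := by
    rw [h2, PySem.List.pyGetD_natCast]
    simp [List.getD]
  simp only [pvSwapStep]
  rw [hg]
  simp only [pysem]
  rw [show ((1:Int) = ((1:Nat) : Int)) from by norm_num, PySem.List.pySetD_natCast]
  rw [h2, PySem.List.pySetD_natCast]
  simp

-- the whole loop on state a :: x :: (u ++ w), ranging i = |u|+1 … 2, moves x past u.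
theorem pvLoop_rotate (u : List (List Int)) : ∀ (a x : List Int) (w : List (List Int)),
    (PySem.List.pyRange ((u.length : Int) + 1) 1 (-1)).foldl pvSwapStep (a :: x :: (u ++ w))
      = a :: (u ++ x :: w) := by
  induction u using List.reverseRecOn with
  | nil =>
    intro a x w
    rw [PySem.List.pyRange_neg_one_eq_nil (by simp)]
    simp
  | append_singleton u' z ih =>
    intro a x w
    rw [PySem.List.pyRange_neg_one_cons (by simp only [List.length_append, List.length_cons, List.length_nil]; omega)]
    have hlen : ((u' ++ [z]).length : Int) + 1 = (u'.length : Int) + 2 := by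
      simp only [List.length_append, List.length_cons, List.length_nil]; push_cast; ring
    rw [List.foldl_cons, hlen]
    have : (a :: x :: (u' ++ [z] ++ w)) = (a :: x :: (u' ++ z :: w)) := by simp
    rw [this, pvSwapStep_eq]
    have hrest : ((u'.length : Int) + 2) - 1 = (u'.length : Int) + 1 := by ring
    rw [hrest, ih a z (x :: w)]
    simp

-- ===== VERDICT (by name: the statement is the Claim_ definition above) =====
theorem define_mode_spec : Claim_equal_define_mode := by
  intro l g _
  unfold Spec_define_mode define_mode define_mode_alt
  split
  · split
    · rename_i hlen
      match l, hlen with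
      | a :: x :: u, _ =>
        have h1 : ((a :: x :: u).length : Int) - 1 = (u.length : Int) + 1 := by
          simp only [List.length_cons]; push_cast; ring
        have h2 : (a :: x :: u) = a :: x :: (u ++ []) := by simp
        rw [h1, h2, pvLoop_rotate u a x []]
        rw [show ((2:Int) = ((2:Nat) : Int)) by norm_num,
          PySem.List.slice_from_natCast]
        rw [show ((1:Int) = ((1:Nat) : Int)) by norm_num,
          PySem.List.slice_to_natCast, PySem.List.slice_natCast]
        simp
    · rfl
  · rfl
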